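-- pv_equiv track=rewrite | github.com/MojcaO/advent-of-code | python/2021/day04/day04.py | prepare_boards
-- ===== SOURCE A (Python) =====
-- def prepare_boards(data):
--     numbers_drawn = data.pop(0).split(',')
--     data.pop(0)
--     boards = []
--     board = []
--     marked = []
--     zero_board = []
--     for d in data:
--         if d != '':
--             line = d.replace('  ', ' 0')
--             if line.startswith(' '):
--                 line = '0'+line[1:]
--             board.append(line)
--             zero_board.append([0,0,0,0,0])
--         else:
--             boards.append(board)
--             board = []
--             marked.append(zero_board)
--             zero_board = []
--     boards.append(board)
--     marked.append(zero_board)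
--     return numbers_drawn, boards, marked
-- ===== SOURCE B (Python) =====
-- def _clean_line(d):
--     line = d.replace('  ', ' 0')
--     return '0' + line[1:] if line.startswith(' ') else line
--
--
-- def prepare_boards(data):
--     numbers_drawn = data.pop(0).split(',')
--     data.pop(0)
--     blocks = []
--     block = []
--     for d in data:
--         if d == '':
--             blocks.append(block)
--             block = []
--         else:
--             block.append(d)
--     blocks.append(block)
--     boards = [[_clean_line(line) for line in blk] for blk in blocks]
--     marked = [[[0, 0, 0, 0, 0] for _ in blk] for blk in blocks]
--     return numbers_drawn, boards, marked
-- ===== Notes on version B (the rewrite author's own statement) =====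
-- stated objective: simpler
-- what changed: Replaces A's single loop that interleaves line-cleaning, zero-row building and board flushing across four accumulators with a plain split-on-blank grouping pass followed by two comprehensions that map cleaning and zero-rows over the groups.
import Mathlib
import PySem

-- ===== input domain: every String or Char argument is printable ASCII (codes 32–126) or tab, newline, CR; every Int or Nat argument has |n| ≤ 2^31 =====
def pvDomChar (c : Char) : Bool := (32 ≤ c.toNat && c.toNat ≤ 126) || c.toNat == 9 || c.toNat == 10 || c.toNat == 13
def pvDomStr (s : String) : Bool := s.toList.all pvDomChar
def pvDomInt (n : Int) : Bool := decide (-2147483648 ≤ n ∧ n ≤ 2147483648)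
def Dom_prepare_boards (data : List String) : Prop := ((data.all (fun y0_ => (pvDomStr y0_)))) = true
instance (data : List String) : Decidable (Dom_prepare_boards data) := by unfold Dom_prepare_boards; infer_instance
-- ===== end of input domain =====

-- B replaces A's interleaved clean-and-flush loop (four accumulators) by a split-on-blank
-- grouping pass followed by two comprehensions (objective: simpler). Both Pythons mutate the
-- argument identically (two pops); the equivalence proved here is about the return value.

-- ===== PORT A =====
def pvCleanA (d : String) : String :=
  let line := PySem.Str.replace d "  " " 0"
  if PySem.Str.startswith line " " then "0" ++ PySem.Str.slice line (some 1) none else line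

def pvStepA (st : List (List String) × List String × List (List (List Int)) × List (List Int))
    (d : String) : List (List String) × List String × List (List (List Int)) × List (List Int) :=
  if d ≠ "" then
    (st.1, st.2.1 ++ [pvCleanA d], st.2.2.1, st.2.2.2 ++ [[0, 0, 0, 0, 0]])
  else
    (st.1 ++ [st.2.1], [], st.2.2.1 ++ [st.2.2.2], [])

def prepare_boards (data : List String) : List String × List (List String) × List (List (List Int)) :=
  match data with
  | first :: _second :: rest =>
    let numbers_drawn := (PySem.Str.split? first ",").getD []   -- sep "," ≠ "": split? is always some
    let st := rest.foldl pvStepA ([], [], [], [])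
    (numbers_drawn, st.1 ++ [st.2.1], st.2.2.1 ++ [st.2.2.2])
  | _ => ([], [], [])   -- data.pop(0) raises IndexError: excluded by Pre_

-- ===== PORT B =====
def pvCleanB (d : String) : String :=
  let line := PySem.Str.replace d "  " " 0"
  if PySem.Str.startswith line " " then "0" ++ PySem.Str.slice line (some 1) none else line

def pvStepB (st : List (List String) × List String) (d : String) :
    List (List String) × List String :=
  if d == "" then (st.1 ++ [st.2], []) else (st.1, st.2 ++ [d])

def prepare_boards_alt (data : List String) : List String × List (List String) × List (List (List Int)) :=
  match data with
  | [] => ([], [], [])   -- data.pop(0) raises IndexError: excluded by Pre_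
  | first :: tail =>
    match tail with
    | [] => ([], [], [])   -- second data.pop(0) raises IndexError: excluded by Pre_
    | _second :: rest =>
      let numbers_drawn := (PySem.Str.split? first ",").getD []   -- sep "," ≠ "": split? is always some
      let st := rest.foldl pvStepB ([], [])
      let bks := st.1 ++ [st.2]
      (numbers_drawn,
       bks.map (fun b => b.map pvCleanB),
       bks.map (fun b => b.map (fun _ => ([0, 0, 0, 0, 0] : List Int))))

-- ===== PRECONDITION & SPEC =====
-- Pre_ excludes only data with fewer than two lines, on which A's two data.pop(0) raise IndexError.
def Pre_prepare_boards (data : List String) : Prop := 2 ≤ data.length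
instance (data : List String) : Decidable (Pre_prepare_boards data) := by unfold Pre_prepare_boards; infer_instance
def pvWitness_prepare_boards : List String := ["7,4,9", "", "22 13 17", " 8  2 23", "", " 3 15  0"]
def Spec_prepare_boards (data : List String) (out : List String × List (List String) × List (List (List Int))) : Prop := out = prepare_boards_alt data
instance (data : List String) (out : List String × List (List String) × List (List (List Int))) : Decidable (Spec_prepare_boards data out) := by unfold Spec_prepare_boards; infer_instance

-- ===== CLAIM (what is proved, stated in full; the proofs are below) =====
def Claim_equal_prepare_boards : Prop := ∀ (data : List String), Dom_prepare_boards data → Pre_prepare_boards data → Spec_prepare_boards data (prepare_boards data)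

-- ===== LEMMAS AND PROOFS =====
def pvZ : String → List Int := fun _ => [0, 0, 0, 0, 0]

lemma pvCleanB_eq : pvCleanB = pvCleanA := rfl

lemma pv_loop_eq (ds : List String) (bs : List (List String)) (cur : List String) :
    ds.foldl pvStepA (bs.map (List.map pvCleanA), cur.map pvCleanA, bs.map (List.map pvZ), cur.map pvZ)
      = ((ds.foldl pvStepB (bs, cur)).1.map (List.map pvCleanA),
         (ds.foldl pvStepB (bs, cur)).2.map pvCleanA,
         (ds.foldl pvStepB (bs, cur)).1.map (List.map pvZ),
         (ds.foldl pvStepB (bs, cur)).2.map pvZ) := by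
  induction ds generalizing bs cur with
  | nil => simp
  | cons d ds ih =>
    by_cases hd : d = ""
    · subst hd
      have hA : pvStepA (bs.map (List.map pvCleanA), cur.map pvCleanA, bs.map (List.map pvZ), cur.map pvZ) ""
          = ((bs ++ [cur]).map (List.map pvCleanA), ([] : List String).map pvCleanA,
             (bs ++ [cur]).map (List.map pvZ), ([] : List String).map pvZ) := by
        simp [pvStepA]
      have hB : pvStepB (bs, cur) ("" : String) = (bs ++ [cur], []) := by simp [pvStepB]
      simp only [List.foldl_cons, hA, hB]
      exact ih (bs ++ [cur]) []
    · have hA : pvStepA (bs.map (List.map pvCleanA), cur.map pvCleanA, bs.map (List.map pvZ), cur.map pvZ) d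
          = (bs.map (List.map pvCleanA), (cur ++ [d]).map pvCleanA,
             bs.map (List.map pvZ), (cur ++ [d]).map pvZ) := by
        simp [pvStepA, hd, pvZ]
      have hB : pvStepB (bs, cur) d = (bs, cur ++ [d]) := by simp [pvStepB, hd]
      simp only [List.foldl_cons, hA, hB]
      exact ih bs (cur ++ [d])

-- ===== VERDICT (by name: the statement is the Claim_ definition above) =====
theorem prepare_boards_spec : Claim_equal_prepare_boards := by
  intro data _dom pre
  unfold Spec_prepare_boards
  match data with
  | [] => simp [Pre_prepare_boards] at pre
  | [_] => simp [Pre_prepare_boards] at pre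
  | first :: second :: rest =>
    have h := pv_loop_eq rest [] []
    simp only [List.map_nil] at h
    have hz : (fun _ : String => ([0, 0, 0, 0, 0] : List Int)) = pvZ := rfl
    simp only [prepare_boards, prepare_boards_alt, pvCleanB_eq, hz, h, List.map_append,
      List.map_cons, List.map_nil]
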